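-- pv_equiv track=rewrite | github.com/andersonn99/caf-validador | api/gerar.py | gerar_combinacoes
-- ===== SOURCE A (Python) =====
-- MAX_WILDCARDS = 5         # limite de asteriscos
--
-- MAX_COMBINACOES = 20000   # limite de combinações retornadas
--
-- def gerar_combinacoes(mask: str, codigos_validos):
--     wc = mask.count('*')
--     total = 10 ** wc
--     if wc > MAX_WILDCARDS:
--         raise ValueError(f'Excesso de curingas ({wc}). Máximo: {MAX_WILDCARDS}')
--     if total > MAX_COMBINACOES:
--         raise ValueError(f'Muitas combinações ({total:,}). Máximo: {MAX_COMBINACOES:,}')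
--
--     combos = []
--     for i in range(total):
--         digits = str(i).zfill(wc)
--         p = 0
--         out = []
--         for ch in mask:
--             if ch == '*':
--                 out.append(digits[p]); p += 1
--             else:
--                 out.append(ch)
--         code = ''.join(out)
--         # aceita se contiver qualquer código válido da planilha
--         for cod_val in codigos_validos:
--             if cod_val in code:
--                 combos.append(code)
--                 break
--     return combos
-- ===== SOURCE B (Python) =====
-- MAX_WILDCARDS = 5         # limite de asteriscos
--
-- MAX_COMBINACOES = 20000   # limite de combinações retornadas
--
-- def _expand(mask):
--     # all fillings of the mask, wildcards replaced left-to-right by digits,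
--     # in lexicographic (= numeric) order, built back-to-front over the mask
--     cands = ['']
--     for ch in reversed(mask):
--         if ch == '*':
--             cands = [d + r for d in '0123456789' for r in cands]
--         else:
--             cands = [ch + r for r in cands]
--     return cands
--
-- def gerar_combinacoes(mask: str, codigos_validos):
--     wc = mask.count('*')
--     total = 10 ** wc
--     if wc > MAX_WILDCARDS:
--         raise ValueError(f'Excesso de curingas ({wc}). Máximo: {MAX_WILDCARDS}')
--     if total > MAX_COMBINACOES:
--         raise ValueError(f'Muitas combinações ({total:,}). Máximo: {MAX_COMBINACOES:,}')
--     return [c for c in _expand(mask) if any(v in c for v in codigos_validos)]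
-- ===== Notes on version B (the rewrite author's own statement) =====
-- stated objective: alternative
-- what changed: B replaces A's integer counting loop (str(i).zfill + a pointer walk over the mask for every i) by a structural recursion on the mask that expands each '*' into the ten digits directly, then filters the candidates once.
import Mathlib
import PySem

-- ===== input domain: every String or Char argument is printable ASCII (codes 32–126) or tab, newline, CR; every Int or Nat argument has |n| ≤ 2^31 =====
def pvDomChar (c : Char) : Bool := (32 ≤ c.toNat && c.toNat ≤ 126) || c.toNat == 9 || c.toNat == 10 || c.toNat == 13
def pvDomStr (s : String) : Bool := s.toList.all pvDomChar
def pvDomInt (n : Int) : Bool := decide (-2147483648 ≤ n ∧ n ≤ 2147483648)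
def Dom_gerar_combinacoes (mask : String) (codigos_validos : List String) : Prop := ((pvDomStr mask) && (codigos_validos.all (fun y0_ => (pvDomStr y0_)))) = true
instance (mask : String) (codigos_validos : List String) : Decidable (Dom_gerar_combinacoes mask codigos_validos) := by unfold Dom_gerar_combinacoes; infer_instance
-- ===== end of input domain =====

-- B replaces A's integer-counting loop (str(i).zfill plus a pointer walk over the mask for every i)
-- by a structural recursion on the mask expanding each '*' into the ten digits, then one filter;
-- an 'alternative' decomposition, not claimed faster.

-- ===== PORT A =====
-- A's inner 'for cod_val in codigos_validos: ... break' loop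
def pvAnyIn (code : String) : List String → Bool
  | [] => false
  | cod :: rest => if PySem.Str.isIn cod code then true else pvAnyIn code rest

def gerar_combinacoes (mask : String) (codigos_validos : List String) : List String :=
  let wc : Nat := PySem.Str.count mask "*"
  let total : Nat := 10 ^ wc
  if wc > 5 then []              -- Python: raise ValueError (excluded by Pre_)
  else if total > 20000 then []  -- Python: raise ValueError (excluded by Pre_)
  else
    (PySem.List.pyRange 0 (total : Int) 1).foldl (fun combos i =>
      let digits : String := PySem.Str.zfill (PySem.Int.toStr i) (wc : Int)
      -- inner 'for ch in mask' with state (p, out); digits[p] is in range for every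
      -- 0 <= i < total, so the ' ' default of pyGet? is never used
      let fin : Nat × List Char := mask.toList.foldl (fun st ch =>
        if ch = '*' then (st.1 + 1, st.2 ++ [(PySem.Str.pyGet? digits (st.1 : Int)).getD ' '])
        else (st.1, st.2 ++ [ch])) (0, ([] : List Char))
      let code : String := String.ofList fin.2
      if pvAnyIn code codigos_validos then combos ++ [code] else combos) []

-- ===== PORT B =====
-- Source B's _expand: all fillings of the mask, built back-to-front over the mask
-- ('for ch in reversed(mask)' with accumulator = a right fold over the characters)
def pvExpand (ms : List Char) : List (List Char) :=
  ms.foldr (fun c rests =>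
    if c = '*' then "0123456789".toList.flatMap (fun d => rests.map (fun r => d :: r))
    else rests.map (fun r => c :: r)) [[]]

def gerar_combinacoes_alt (mask : String) (codigos_validos : List String) : List String :=
  let wc : Nat := PySem.Str.count mask "*"
  let total : Nat := 10 ^ wc
  if wc > 5 then []              -- Python: raise ValueError (excluded by Pre_)
  else if total > 20000 then []  -- Python: raise ValueError (excluded by Pre_)
  else
    ((pvExpand mask.toList).filter
      (fun c => codigos_validos.any (fun v => PySem.Chars.isIn v.toList c))).map String.ofList

-- ===== PRECONDITION & SPEC =====
-- Python A raises ValueError exactly when the mask holds 5 or more '*' (wc > 5, or 10^wc > 20000)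
def Pre_gerar_combinacoes (mask : String) (codigos_validos : List String) : Prop :=
  PySem.Str.count mask "*" ≤ 4
instance (mask : String) (codigos_validos : List String) : Decidable (Pre_gerar_combinacoes mask codigos_validos) := by unfold Pre_gerar_combinacoes; infer_instance
def pvWitness_gerar_combinacoes : String × List String := ("AB*1*", ["B01"])

def Spec_gerar_combinacoes (mask : String) (codigos_validos : List String) (out : List String) : Prop := out = gerar_combinacoes_alt mask codigos_validos
instance (mask : String) (codigos_validos : List String) (out : List String) : Decidable (Spec_gerar_combinacoes mask codigos_validos out) := by unfold Spec_gerar_combinacoes; infer_instance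

-- ===== CLAIM (what is proved, stated in full; the proofs are below) =====
def Claim_equal_gerar_combinacoes : Prop := ∀ (mask : String) (codigos_validos : List String), Dom_gerar_combinacoes mask codigos_validos → Pre_gerar_combinacoes mask codigos_validos → Spec_gerar_combinacoes mask codigos_validos (gerar_combinacoes mask codigos_validos)

-- ===== LEMMAS AND PROOFS =====

theorem pv_toDigitsCore_succ (f n : Nat) (acc : List Char) :
    Nat.toDigitsCore 10 (f+1) n acc =
      if n / 10 = 0 then Nat.digitChar (n % 10) :: acc
      else Nat.toDigitsCore 10 f (n / 10) (Nat.digitChar (n % 10) :: acc) := by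
  simp [Nat.toDigitsCore]

theorem pv_toDigits_lt_ten (m : Nat) (h : m < 10) :
    Nat.toDigits 10 m = [Nat.digitChar m] := by
  unfold Nat.toDigits
  rw [pv_toDigitsCore_succ]
  rw [if_pos (Nat.div_eq_of_lt h), Nat.mod_eq_of_lt h]

theorem pv_toDigitsCore_fuel (n : Nat) : ∀ (f₁ f₂ : Nat) (acc : List Char), n < f₁ → n < f₂ →
    Nat.toDigitsCore 10 f₁ n acc = Nat.toDigitsCore 10 f₂ n acc := by
  induction n using Nat.strong_induction_on with
  | _ n ih =>
    intro f₁ f₂ acc h1 h2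
    obtain ⟨g₁, rfl⟩ : ∃ g, f₁ = g + 1 := ⟨f₁ - 1, by omega⟩
    obtain ⟨g₂, rfl⟩ : ∃ g, f₂ = g + 1 := ⟨f₂ - 1, by omega⟩
    rw [pv_toDigitsCore_succ, pv_toDigitsCore_succ]
    by_cases h : n / 10 = 0
    · simp [h]
    · rw [if_neg h, if_neg h]
      have hlt : n / 10 < n := Nat.div_lt_self (by omega) (by omega)
      exact ih (n / 10) hlt g₁ g₂ _ (by omega) (by omega)

theorem pv_toDigitsCore_acc (f : Nat) : ∀ (n : Nat) (acc : List Char),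
    Nat.toDigitsCore 10 f n acc = Nat.toDigitsCore 10 f n [] ++ acc := by
  induction f with
  | zero => intro n acc; simp [Nat.toDigitsCore]
  | succ f ih =>
    intro n acc
    rw [pv_toDigitsCore_succ, pv_toDigitsCore_succ]
    by_cases h : n / 10 = 0
    · simp [h]
    · rw [if_neg h, if_neg h, ih (n/10) (Nat.digitChar (n % 10) :: acc),
        ih (n/10) [Nat.digitChar (n % 10)]]
      simp

theorem pv_toDigits_step (n : Nat) (h : 10 ≤ n) :
    Nat.toDigits 10 n = Nat.toDigits 10 (n / 10) ++ [Nat.digitChar (n % 10)] := by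
  unfold Nat.toDigits
  rw [pv_toDigitsCore_succ, if_neg (by omega : ¬ n / 10 = 0), pv_toDigitsCore_acc]
  congr 1
  exact pv_toDigitsCore_fuel (n/10) n (n/10 + 1) []
    (by have := Nat.div_lt_self (by omega : 0 < n) (by omega : 1 < 10); omega) (by omega)

theorem pv_toDigits_head (n : Nat) :
    ∃ c t, Nat.toDigits 10 n = c :: t ∧ ¬(c = '+' ∨ c = '-') := by
  induction n using Nat.strong_induction_on with
  | _ n ih =>
    by_cases h : n < 10
    · refine ⟨Nat.digitChar n, [], pv_toDigits_lt_ten n h, ?_⟩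
      interval_cases n <;> decide
    · obtain ⟨c, t, hct, hc⟩ := ih (n / 10) (Nat.div_lt_self (by omega) (by omega))
      exact ⟨c, t ++ [Nat.digitChar (n % 10)], by rw [pv_toDigits_step n (by omega), hct]; simp, hc⟩

theorem pv_zfill_succ (cs : List Char) (k : Nat) (c : Char) (t : List Char)
    (hcs : cs = c :: t) (hc : ¬(c = '+' ∨ c = '-')) (h : cs.length ≤ k) :
    PySem.Chars.zfill cs ((k : Int) + 1) = '0' :: PySem.Chars.zfill cs (k : Int) := by
  subst hcs
  simp only [List.length_cons] at h
  unfold PySem.Chars.zfill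
  rw [if_neg (by simp only [List.length_cons]; push_cast; omega)]
  by_cases hk : (k : Int) ≤ (c :: t).length
  · rw [if_pos hk]
    simp only [List.length_cons] at hk
    simp only [if_neg hc]
    rw [show ((k : Int) + 1).toNat - (c :: t).length = 1 by simp only [List.length_cons]; omega]
    simp
  · rw [if_neg hk]
    simp only [List.length_cons] at hk
    simp only [if_neg hc]
    rw [show ((k : Int) + 1).toNat - (c :: t).length = ((k : Int).toNat - (c :: t).length) + 1 by
      simp only [List.length_cons]; omega]
    simp [List.replicate_succ]

theorem pv_zfill_append (cs : List Char) (k : Nat) (c : Char) (t : List Char) (ch : Char)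
    (hcs : cs = c :: t) (hc : ¬(c = '+' ∨ c = '-')) :
    PySem.Chars.zfill (cs ++ [ch]) ((k : Int) + 1) = PySem.Chars.zfill cs (k : Int) ++ [ch] := by
  subst hcs
  unfold PySem.Chars.zfill
  by_cases hk : (k : Int) ≤ (c :: t).length
  · rw [if_pos (by simp only [List.cons_append, List.length_cons, List.length_append,
      List.length_cons, List.length_nil] at hk ⊢; omega), if_pos hk]
  · rw [if_neg (by simp only [List.cons_append, List.length_cons, List.length_append,
      List.length_cons, List.length_nil] at hk ⊢; omega), if_neg hk]
    simp only [List.cons_append, if_neg hc]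
    rw [show ((k : Int) + 1).toNat - (c :: (t ++ [ch])).length = (k : Int).toNat - (c :: t).length by
      simp only [List.length_cons, List.length_append, List.length_nil] at hk ⊢; omega]
    simp

theorem pv_zfill_of_le (cs : List Char) (k : Nat) (h : k ≤ cs.length) :
    PySem.Chars.zfill cs (k : Int) = cs := by
  unfold PySem.Chars.zfill
  rw [if_pos (by omega)]

theorem pv_zfill_singleton (c : Char) (hc : ¬(c = '+' ∨ c = '-')) (k : Nat) (hk : 1 ≤ k) :
    PySem.Chars.zfill [c] (k : Int) = List.replicate (k - 1) '0' ++ [c] := by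
  unfold PySem.Chars.zfill
  by_cases h : (k : Int) ≤ ([c] : List Char).length
  · rw [if_pos h]
    simp at h
    rw [show k - 1 = 0 by omega]
    simp
  · rw [if_neg h]
    simp at h
    simp only [if_neg hc]
    simp only [List.length_cons, List.length_nil]
    rw [show (k : Int).toNat - (0+1) = k - 1 by omega]

def pvW (k n : Nat) : List Char := PySem.Chars.zfill (Nat.toDigits 10 n) (k : Int)

theorem pv_W_shift (k : Nat) (hk : 1 ≤ k) : ∀ r : Nat, r < 10 ^ (k + 1) →
    pvW (k + 1) r = pvW k (r / 10) ++ [Nat.digitChar (r % 10)] := by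
  intro r _
  by_cases h : r < 10
  · rw [pvW, pvW, pv_toDigits_lt_ten r h, Nat.div_eq_of_lt h, Nat.mod_eq_of_lt h,
      pv_toDigits_lt_ten 0 (by omega),
      show ((k+1 : Nat) : Int) = (k : Int) + 1 from by push_cast; ring]
    have hdc : ¬(Nat.digitChar r = '+' ∨ Nat.digitChar r = '-') := by interval_cases r <;> decide
    rw [pv_zfill_succ [Nat.digitChar r] k (Nat.digitChar r) [] rfl hdc (by simp; omega),
      pv_zfill_singleton _ hdc k hk, show (Nat.digitChar 0) = '0' from by decide,
      pv_zfill_singleton '0' (by decide) k hk]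
    have h2 : '0' :: List.replicate (k-1) '0' = List.replicate (k-1) '0' ++ ['0'] := by
      rw [← List.replicate_succ, ← List.replicate_succ']
    rw [show '0' :: (List.replicate (k-1) '0' ++ [Nat.digitChar r])
        = ('0' :: List.replicate (k-1) '0') ++ [Nat.digitChar r] from rfl, h2]
  · rw [pvW, pvW, pv_toDigits_step r (by omega),
      show ((k+1 : Nat) : Int) = (k : Int) + 1 from by push_cast; ring]
    obtain ⟨c, t, hct, hc⟩ := pv_toDigits_head (r / 10)
    rw [pv_zfill_append _ k c t _ hct hc]

theorem pv_toDigits_block (k : Nat) (hk : 1 ≤ k) : ∀ (d r : Nat), 1 ≤ d → d ≤ 9 → r < 10 ^ k →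
    Nat.toDigits 10 (d * 10 ^ k + r) = Nat.digitChar d :: pvW k r := by
  induction k with
  | zero => omega
  | succ k ih =>
    intro d r hd1 hd9 hr
    by_cases hk1 : k = 0
    · subst hk1
      have hr10 : r < 10 := by simpa using hr
      rw [pv_toDigits_step (d * 10 ^ 1 + r) (by nlinarith)]
      have hdiv : (d * 10 ^ 1 + r) / 10 = d := by omega
      have hmod : (d * 10 ^ 1 + r) % 10 = r := by omega
      rw [hdiv, hmod, pv_toDigits_lt_ten d (by omega), pvW, pv_toDigits_lt_ten r hr10,
        pv_zfill_of_le _ 1 (by simp)]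
      simp
    · have hk' : 1 ≤ k := by omega
      have h10 : (10:Nat) ≤ d * 10 ^ (k+1) + r := by
        have : (10:Nat) ≤ 10 ^ (k+1) := by
          calc (10:Nat) = 10^1 := by norm_num
          _ ≤ 10 ^ (k+1) := Nat.pow_le_pow_right (by norm_num) (by omega)
        nlinarith
      rw [pv_toDigits_step _ h10]
      have hdiv : (d * 10 ^ (k+1) + r) / 10 = d * 10 ^ k + r / 10 := by
        rw [pow_succ, show d * (10 ^ k * 10) + r = 10 * (d * 10 ^ k) + r by ring, Nat.mul_add_div (by norm_num)]
      have hmod : (d * 10 ^ (k+1) + r) % 10 = r % 10 := by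
        rw [pow_succ, show d * (10 ^ k * 10) + r = 10 * (d * 10 ^ k) + r by ring, Nat.mul_add_mod]
      rw [hdiv, hmod, ih hk' d (r/10) hd1 hd9 (by
        rw [Nat.div_lt_iff_lt_mul (by norm_num : (0:Nat) < 10), ← pow_succ]
        exact hr)]
      rw [pv_W_shift k hk' r hr]
      simp

theorem pv_W_block (k : Nat) (hk : 1 ≤ k) (d r : Nat) (hd : d < 10) (hr : r < 10 ^ k) :
    pvW (k + 1) (d * 10 ^ k + r) = Nat.digitChar d :: pvW k r := by
  by_cases hd0 : d = 0
  · subst hd0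
    simp only [Nat.zero_mul, Nat.zero_add]
    obtain ⟨c, t, hct, hc⟩ := pv_toDigits_head r
    rw [pvW, show ((k+1 : Nat) : Int) = (k : Int) + 1 from by push_cast; ring,
      pv_zfill_succ _ k c t hct hc (by
        exact Nat.toDigits_length 10 r k (by omega) hr)]
    rw [show Nat.digitChar 0 = '0' from by decide]
    rfl
  · have h1 : (Nat.toDigits 10 (d * 10 ^ k + r)) = Nat.digitChar d :: pvW k r :=
      pv_toDigits_block k hk d r (by omega) (by omega) hr
    have hlen : k ≤ (pvW k r).length := by
      rw [pvW, PySem.Chars.length_zfill]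
      simp
    rw [pvW, h1, pv_zfill_of_le _ (k+1) (by simp only [List.length_cons]; omega)]

def pvDigitStrings : Nat → List (List Char)
  | 0 => [[]]
  | k + 1 => "0123456789".toList.flatMap (fun d => (pvDigitStrings k).map (d :: ·))

theorem pv_range_mul (m n : Nat) :
    List.range (m * n) = (List.range m).flatMap (fun d => (List.range n).map (fun r => d * n + r)) := by
  induction m with
  | zero => simp
  | succ m ih =>
    rw [Nat.succ_mul, List.range_add, ih, List.range_succ]
    simp [List.flatMap_append]

theorem pv_range_map_W (k : Nat) (hk : 1 ≤ k) :
    (List.range (10 ^ k)).map (pvW k) = pvDigitStrings k := by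
  induction k with
  | zero => omega
  | succ k ih =>
    by_cases hk1 : k = 0
    · subst hk1; decide
    · have hk' : 1 ≤ k := by omega
      rw [pow_succ, mul_comm, pv_range_mul 10 (10 ^ k), List.map_flatMap]
      rw [show pvDigitStrings (k+1)
          = "0123456789".toList.flatMap (fun d => (pvDigitStrings k).map (d :: ·)) from rfl]
      rw [show "0123456789".toList = (List.range 10).map Nat.digitChar from by decide,
        List.flatMap_map]
      apply List.flatMap_congr  -- maybe name differs
      intro d hd
      rw [List.map_map]
      have hd10 : d < 10 := List.mem_range.mp hd
      rw [show (List.range (10 ^ k)).map (pvW (k+1) ∘ fun r => d * 10 ^ k + r)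
          = (List.range (10 ^ k)).map ((Nat.digitChar d :: ·) ∘ pvW k) from
        List.map_congr_left (fun r hr => by
          simp only [Function.comp]
          exact pv_W_block k hk' d r hd10 (List.mem_range.mp hr))]
      rw [← List.map_map, ih hk']

theorem pv_count_go (fuel : Nat) : ∀ (cs : List Char) (acc : Nat), cs.length ≤ fuel →
    PySem.Chars.count.go ['*'] fuel cs acc = acc + cs.count '*' := by
  induction fuel with
  | zero =>
    intro cs acc h
    have : cs = [] := by cases cs <;> simp_all
    subst this
    simp [PySem.Chars.count.go]
  | succ fuel ih =>
    intro cs acc h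
    match cs with
    | [] => simp [PySem.Chars.count.go]
    | c :: t =>
      rw [show PySem.Chars.count.go ['*'] (fuel+1) (c :: t) acc
          = if ['*'].isPrefixOf (c :: t) = true
            then PySem.Chars.count.go ['*'] fuel (List.drop (['*'] : List Char).length (c :: t)) (acc + 1)
            else PySem.Chars.count.go ['*'] fuel t acc from by
        simp [PySem.Chars.count.go]]
      by_cases hc : c = '*'
      · subst hc
        rw [if_pos (by simp [List.isPrefixOf])]
        simp only [List.length_cons, List.length_nil, List.drop]
        rw [ih t (acc+1) (by simpa using h)]
        simp
        omega
      · have hne : ¬ '*' = c := fun hcc => hc (Eq.symm hcc)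
        rw [if_neg (by simp [List.isPrefixOf]; exact hne)]
        rw [ih t acc (by simpa using h)]
        simp [hc]

theorem pv_count_star (s : String) :
    PySem.Str.count s "*" = s.toList.count '*' := by
  rw [show PySem.Str.count s "*" = PySem.Chars.count s.toList ['*'] from rfl]
  rw [show PySem.Chars.count s.toList ['*']
      = PySem.Chars.count.go ['*'] s.toList.length s.toList 0 from by
    simp [PySem.Chars.count]]
  rw [pv_count_go s.toList.length s.toList 0 le_rfl]
  omega

def pvFill : List Char → List Char → List Char
  | [], _ => []
  | c :: r, ds => if c = '*' then (ds.head?.getD ' ') :: pvFill r ds.tail else c :: pvFill r ds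

theorem pv_fill_no_star (ms : List Char) (h : ms.count '*' = 0) : ∀ ds, pvFill ms ds = ms := by
  induction ms with
  | nil => intro ds; rfl
  | cons c r ih =>
    intro ds
    simp only [List.count_cons] at h
    have hc : ¬ c = '*' := by by_contra hc; simp [hc] at h
    rw [pvFill, if_neg hc, ih (by omega) ds]

theorem pv_fold_fill (ds : List Char) (ms : List Char) : ∀ (p : Nat) (out : List Char),
    (ms.foldl (fun (st : Nat × List Char) ch =>
      if ch = '*' then (st.1 + 1, st.2 ++ [(PySem.List.pyGet? ds (st.1 : Int)).getD ' '])
      else (st.1, st.2 ++ [ch])) (p, out)).2 = out ++ pvFill ms (ds.drop p) := by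
  induction ms with
  | nil => intro p out; simp [pvFill]
  | cons c r ih =>
    intro p out
    rw [List.foldl_cons]
    by_cases hc : c = '*'
    · subst hc
      rw [if_pos rfl]
      simp only []
      rw [ih (p+1) _]
      rw [pvFill, if_pos rfl]
      rw [PySem.List.pyGet?_natCast]
      rw [List.tail_drop]
      have : ds[p]? = (ds.drop p).head? := by
        rw [List.head?_drop]
      rw [this]
      simp
    · rw [if_neg hc]
      simp only []
      rw [ih p _]
      rw [pvFill, if_neg hc]
      simp


theorem pv_expand_eq (ms : List Char) :
    pvExpand ms = (pvDigitStrings (ms.count '*')).map (pvFill ms) := by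
  induction ms with
  | nil => rfl
  | cons c r ih =>
    have hstep : pvExpand (c :: r) =
        if c = '*' then "0123456789".toList.flatMap (fun d => (pvExpand r).map (fun x => d :: x))
        else (pvExpand r).map (fun x => c :: x) := rfl
    by_cases hc : c = '*'
    · subst hc
      rw [hstep, if_pos rfl]
      rw [show List.count '*' ('*' :: r) = List.count '*' r + 1 by simp]
      rw [show pvDigitStrings (List.count '*' r + 1)
          = "0123456789".toList.flatMap (fun d => (pvDigitStrings (List.count '*' r)).map (d :: ·)) from rfl]
      rw [List.map_flatMap]
      apply List.flatMap_congr
      intro d _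
      rw [ih, List.map_map, List.map_map]
      apply List.map_congr_left
      intro t _
      simp only [Function.comp]
      rw [pvFill, if_pos rfl]
      simp
    · rw [hstep, if_neg hc]
      rw [show List.count '*' (c :: r) = List.count '*' r by
        simp [hc]]
      rw [ih, List.map_map]
      apply List.map_congr_left
      intro t _
      simp only [Function.comp]
      rw [pvFill, if_neg hc]


theorem pv_anyIn_eq (code : String) (l : List String) :
    pvAnyIn code l = l.any (fun v => PySem.Chars.isIn v.toList code.toList) := by
  induction l with
  | nil => rfl
  | cons cod rest ih =>
    rw [pvAnyIn, List.any_cons, ← ih]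
    rw [show PySem.Str.isIn cod code = PySem.Chars.isIn cod.toList code.toList from rfl]
    by_cases h : PySem.Chars.isIn cod.toList code.toList = true
    · simp [h]
    · simp only [Bool.not_eq_true] at h
      simp [h]

theorem pv_filter_map_comm {α β : Type} (l : List α) (f : α → β) (q : β → Bool) :
    (l.filter (fun x => q (f x))).map f = (l.map f).filter q := by
  induction l with
  | nil => rfl
  | cons x t ih =>
    by_cases h : q (f x) = true
    · simp [h, ih]
    · simp only [Bool.not_eq_true] at h
      simp [h, ih]

theorem pv_main_core (ms : List Char) (cods : List String) (wc : Nat)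
    (hwc : wc = ms.count '*') (h4 : wc ≤ 4) :
    (PySem.List.pyRange 0 ((10 ^ wc : Nat) : Int) 1).foldl (fun combos i =>
      if pvAnyIn (String.ofList
          (ms.foldl (fun (st : Nat × List Char) ch =>
            if ch = '*' then (st.1 + 1, st.2 ++ [(PySem.Str.pyGet? (PySem.Str.zfill (PySem.Int.toStr i) (wc : Int)) (st.1 : Int)).getD ' '])
            else (st.1, st.2 ++ [ch])) (0, ([] : List Char))).2) cods
        then combos ++ [String.ofList
          (ms.foldl (fun (st : Nat × List Char) ch =>
            if ch = '*' then (st.1 + 1, st.2 ++ [(PySem.Str.pyGet? (PySem.Str.zfill (PySem.Int.toStr i) (wc : Int)) (st.1 : Int)).getD ' '])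
            else (st.1, st.2 ++ [ch])) (0, ([] : List Char))).2]
        else combos) []
    = ((pvExpand ms).filter
        (fun c => cods.any (fun v => PySem.Chars.isIn v.toList c))).map String.ofList := by
  have hF : ∀ i : Int, (ms.foldl (fun (st : Nat × List Char) ch =>
      if ch = '*' then (st.1 + 1, st.2 ++ [(PySem.Str.pyGet? (PySem.Str.zfill (PySem.Int.toStr i) (wc : Int)) (st.1 : Int)).getD ' '])
      else (st.1, st.2 ++ [ch])) (0, ([] : List Char))).2
      = pvFill ms (PySem.Chars.zfill (PySem.Int.toChars i) (wc : Int)) := by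
    intro i
    simp only [PySem.Str.pyGet?_eq, PySem.Chars.pyGet?]
    rw [pv_fold_fill ((PySem.Str.zfill (PySem.Int.toStr i) (wc : Int)).toList) ms 0 []]
    simp only [List.drop_zero, List.nil_append]
    rw [PySem.Str.toList_zfill, PySem.Int.toList_toStr]
  rw [PySem.List.foldl_append_if]
  rw [List.nil_append]
  simp only [hF]
  have hMap : (PySem.List.pyRange 0 ((10 ^ wc : Nat) : Int) 1).map
        (fun i => String.ofList (pvFill ms (PySem.Chars.zfill (PySem.Int.toChars i) (wc : Int))))
      = (pvExpand ms).map String.ofList := by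
    rw [PySem.List.pyRange_zero_nat (10 ^ wc), List.map_map]
    rw [List.map_congr_left (g := String.ofList ∘ pvFill ms ∘ pvW wc) (fun n _ => by
      simp only [Function.comp, pvW]
      rw [show PySem.Int.toChars (n : Int) = Nat.toDigits 10 n from by simp [PySem.Int.toChars]])]
    by_cases h0 : wc = 0
    · subst h0
      have hns : ms.count '*' = 0 := hwc.symm
      rw [show List.range (10 ^ 0) = [0] from rfl]
      simp only [List.map_cons, List.map_nil, Function.comp]
      rw [pv_expand_eq ms, hns]
      rw [show pvDigitStrings 0 = [[]] from rfl]
      simp only [List.map_cons, List.map_nil]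
      rw [pv_fill_no_star ms hns, pv_fill_no_star ms hns]
    · have h1 : 1 ≤ wc := by omega
      calc (List.range (10 ^ wc)).map (String.ofList ∘ pvFill ms ∘ pvW wc)
          = (((List.range (10 ^ wc)).map (pvW wc)).map (pvFill ms)).map String.ofList := by
            simp [List.map_map]
        _ = ((pvDigitStrings wc).map (pvFill ms)).map String.ofList := by
            rw [pv_range_map_W wc h1]
        _ = (pvExpand ms).map String.ofList := by rw [pv_expand_eq ms, ← hwc]
  have step1 := pv_filter_map_comm (PySem.List.pyRange 0 ((10 ^ wc : Nat) : Int) 1)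
    (fun i => String.ofList (pvFill ms (PySem.Chars.zfill (PySem.Int.toChars i) (wc : Int))))
    (fun s => pvAnyIn s cods)
  refine step1.trans ?_
  rw [hMap]
  rw [← pv_filter_map_comm]
  apply congrArg
  apply List.filter_congr
  intro c _
  rw [pv_anyIn_eq]
  simp


theorem pv_final (mask : String) (codigos_validos : List String)
    (hpre : PySem.Str.count mask "*" ≤ 4) :
    gerar_combinacoes mask codigos_validos = gerar_combinacoes_alt mask codigos_validos := by
  have h5 : ¬ PySem.Str.count mask "*" > 5 := by omega
  have htot : ¬ 10 ^ PySem.Str.count mask "*" > 20000 := by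
    have h1 : (10:Nat) ^ PySem.Str.count mask "*" ≤ 10 ^ 4 :=
      Nat.pow_le_pow_right (by norm_num) hpre
    have h2 : (10:Nat) ^ 4 = 10000 := by norm_num
    omega
  simp only [gerar_combinacoes, gerar_combinacoes_alt]
  rw [if_neg h5, if_neg htot, if_neg h5, if_neg htot]
  exact pv_main_core mask.toList codigos_validos (PySem.Str.count mask "*")
    (pv_count_star mask) hpre

-- ===== VERDICT (by name: the statement is the Claim_ definition above) =====
theorem gerar_combinacoes_spec : Claim_equal_gerar_combinacoes := by
  intro mask codigos_validos _ hpre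
  unfold Pre_gerar_combinacoes at hpre
  unfold Spec_gerar_combinacoes
  exact pv_final mask codigos_validos hpre
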